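-- pv_equiv track=rewrite | github.com/michafdlr/advent_of_code | day20/main.py | get_shortcuts
-- ===== SOURCE A (Python) =====
-- def manhattan_dist(p1, p2):
--     return abs(p2[0] - p1[0]) + abs(p2[1] - p1[1])
--
-- def get_shortcuts(path, i , max_time = 20, min_saved = 100):
--     positions = set()
--     j = i+min_saved+2
--     while j < len(path):
--         dist = manhattan_dist(path[i],path[j])
--         gain = j - i - manhattan_dist(path[i],path[j])
--         if dist<=max_time and gain>=min_saved:
--             steps = max_time-dist+1
--             for k in range(min(len(path)-j, steps)):
--                 positions.add(path[j+k])
--             j += steps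
--         elif dist<=max_time:
--             j += (min_saved+1-gain)//2
--         else:
--             j += dist-max_time
--     return positions
-- ===== SOURCE B (Python) =====
-- def get_shortcuts(path, i, max_time=20, min_saved=100):
--     positions = set()
--     for j in range(i + min_saved + 2, len(path)):
--         dist = abs(path[j][0] - path[i][0]) + abs(path[j][1] - path[i][1])
--         if dist <= max_time and j - i - dist >= min_saved:
--             positions.add(path[j])
--     return positions
-- ===== Notes on version B (the rewrite author's own statement) =====
-- stated objective: simpler
-- what changed: Replaced A's three-branch jump-skip while-loop with block adds by a single flat for-loop over j in [i+min_saved+2, len(path)) that tests each index individually; on actual grid paths (consecutive points at Manhattan distance <= 1) every block-added index qualifies and every jumped index fails, so the sets coincide.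
-- outside the precondition, e.g. on get_shortcuts([(-3, 0), (2, -2), (1, 2)], -3, 1, -1): A returns set(), B returns {(-3, 0)}
import Mathlib
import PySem

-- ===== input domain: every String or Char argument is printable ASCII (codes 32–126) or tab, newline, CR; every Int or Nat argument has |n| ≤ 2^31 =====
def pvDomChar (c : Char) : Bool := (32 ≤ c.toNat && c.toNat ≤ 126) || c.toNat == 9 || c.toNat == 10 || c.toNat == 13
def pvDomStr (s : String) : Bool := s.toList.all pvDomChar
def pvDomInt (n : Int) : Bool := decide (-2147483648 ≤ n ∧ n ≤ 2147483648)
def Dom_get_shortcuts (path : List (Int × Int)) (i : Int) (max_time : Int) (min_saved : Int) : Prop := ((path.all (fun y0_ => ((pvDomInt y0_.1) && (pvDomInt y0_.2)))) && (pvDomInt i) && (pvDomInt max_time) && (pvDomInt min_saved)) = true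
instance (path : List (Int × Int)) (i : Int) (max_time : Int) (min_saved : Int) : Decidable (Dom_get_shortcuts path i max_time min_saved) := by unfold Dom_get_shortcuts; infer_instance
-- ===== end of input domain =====

-- B replaces A's jump-skip while-loop (block adds + three jump branches) by one flat scan that
-- tests every index individually; on the natural domain (an actual grid path) the two sets coincide.
-- Objective: simpler.

-- ===== PORT A =====
-- helper manhattan_dist
def pvManh (p q : Int × Int) : Int := |q.1 - p.1| + |q.2 - p.2|

-- the while-loop of A; j jumps forward by a positive amount each iteration
def get_shortcuts_loop (path : List (Int × Int)) (i max_time min_saved : Int)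
    (j : Int) (positions : PySem.Set (Int × Int)) : PySem.Set (Int × Int) :=
  if hlt : j < (path.length : Int) then
    match PySem.List.pyGet? path i, PySem.List.pyGet? path j with
    | some pi, some pj =>
      let dist := pvManh pi pj
      let gain := j - i - pvManh pi pj
      if hq : dist ≤ max_time ∧ gain ≥ min_saved then
        get_shortcuts_loop path i max_time min_saved (j + (max_time - dist + 1))
          ((PySem.List.pyRange 0 (min ((path.length : Int) - j) (max_time - dist + 1)) 1).foldl
            (fun s k =>
              match PySem.List.pyGet? path (j + k) with
              | some p => PySem.Set.add s p
              | none => s) positions)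
      else if hq2 : dist ≤ max_time then
        get_shortcuts_loop path i max_time min_saved
          (j + PySem.Int.floordiv (min_saved + 1 - gain) 2) positions
      else
        get_shortcuts_loop path i max_time min_saved (j + (dist - max_time)) positions
    | _, _ => positions  -- IndexError in Python; unreachable under Pre_
  else positions
termination_by ((path.length : Int) - j).toNat
decreasing_by
  · omega
  · have h2 : PySem.Int.floordiv (min_saved + 1 - gain) 2 = (min_saved + 1 - gain) / 2 :=
      PySem.Int.floordiv_eq_ediv_of_pos (by omega)
    simp only [gain, dist] at *
    omega
  · omega

def get_shortcuts (path : List (Int × Int)) (i : Int) (max_time : Int) (min_saved : Int) : List (Int × Int) :=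
  get_shortcuts_loop path i max_time min_saved (i + min_saved + 2) []

-- ===== PORT B =====
def get_shortcuts_alt (path : List (Int × Int)) (i : Int) (max_time : Int) (min_saved : Int) : List (Int × Int) :=
  (PySem.List.pyRange (i + min_saved + 2) (path.length : Int) 1).foldl
    (fun positions j =>
      match PySem.List.pyGet? path j, PySem.List.pyGet? path i with
      | some pj, some pi =>
        let dist := |pj.1 - pi.1| + |pj.2 - pi.2|
        if dist ≤ max_time ∧ j - i - dist ≥ min_saved then PySem.Set.add positions pj else positions
      | _, _ => positions) []

-- ===== PRECONDITION & SPEC =====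
-- Pre_ restricts the reachable part of the loop to the function's natural domain: whenever the scan
-- window [i+min_saved+2, len(path)) is nonempty, i must be a valid non-negative index, the window must
-- start at a non-negative index (no Python negative-index wraparound), and path must be an actual grid
-- path (consecutive points at Manhattan distance ≤ 1); on arbitrary point lists A's jump-skip heuristic
-- adds whole blocks of / skips over individually unqualified indices and its value is accidental.
def Pre_get_shortcuts (path : List (Int × Int)) (i : Int) (max_time : Int) (min_saved : Int) : Prop :=
  i + min_saved + 2 < (path.length : Int) →
    (0 ≤ i ∧ i < (path.length : Int) ∧ 0 ≤ i + min_saved + 2 ∧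
     List.IsChain (fun p q : Int × Int => |q.1 - p.1| + |q.2 - p.2| ≤ 1) path)
instance (path : List (Int × Int)) (i : Int) (max_time : Int) (min_saved : Int) : Decidable (Pre_get_shortcuts path i max_time min_saved) := by
  unfold Pre_get_shortcuts; infer_instance

def pvWitness_get_shortcuts : (List (Int × Int)) × Int × Int × Int :=
  ([(0, 0), (0, 1), (1, 1), (1, 2), (1, 3)], 0, 3, 0)

def Spec_get_shortcuts (path : List (Int × Int)) (i : Int) (max_time : Int) (min_saved : Int) (out : List (Int × Int)) : Prop := out = get_shortcuts_alt path i max_time min_saved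
instance (path : List (Int × Int)) (i : Int) (max_time : Int) (min_saved : Int) (out : List (Int × Int)) : Decidable (Spec_get_shortcuts path i max_time min_saved out) := by unfold Spec_get_shortcuts; infer_instance

-- ===== CLAIM (what is proved, stated in full; the proofs are below) =====
def Claim_equal_get_shortcuts : Prop := ∀ (path : List (Int × Int)) (i : Int) (max_time : Int) (min_saved : Int), Dom_get_shortcuts path i max_time min_saved → Pre_get_shortcuts path i max_time min_saved → Spec_get_shortcuts path i max_time min_saved (get_shortcuts path i max_time min_saved)

-- ===== LEMMAS AND PROOFS =====

-- the point at (non-negative) index j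
def pvAt (path : List (Int × Int)) (j : Int) : Int × Int := path.getD j.toNat (0, 0)
-- distance from path[i] to path[j]
def pvD (path : List (Int × Int)) (i j : Int) : Int := pvManh (pvAt path i) (pvAt path j)
-- the qualification test B applies at index j
abbrev pvQ (path : List (Int × Int)) (i max_time min_saved j : Int) : Prop :=
  pvD path i j ≤ max_time ∧ min_saved ≤ j - i - pvD path i j
-- B's loop body as a named function (definitionally the lambda in get_shortcuts_alt)
def pvBstep (path : List (Int × Int)) (i max_time min_saved : Int)
    (positions : List (Int × Int)) (j : Int) : List (Int × Int) :=
  match PySem.List.pyGet? path j, PySem.List.pyGet? path i with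
  | some pj, some pi =>
    let dist := |pj.1 - pi.1| + |pj.2 - pi.2|
    if dist ≤ max_time ∧ j - i - dist ≥ min_saved then PySem.Set.add positions pj else positions
  | _, _ => positions

lemma alt_eq (path : List (Int × Int)) (i max_time min_saved : Int) :
    get_shortcuts_alt path i max_time min_saved =
      (PySem.List.pyRange (i + min_saved + 2) (path.length : Int) 1).foldl
        (pvBstep path i max_time min_saved) [] := rfl

lemma pvManh_self (p : Int × Int) : pvManh p p = 0 := by simp [pvManh]

lemma pvManh_comm (p q : Int × Int) : pvManh p q = pvManh q p := by
  simp [pvManh, abs_sub_comm]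

lemma pvManh_triangle (p q r : Int × Int) : pvManh p r ≤ pvManh p q + pvManh q r := by
  have h1 := abs_sub_le r.1 q.1 p.1
  have h2 := abs_sub_le r.2 q.2 p.2
  have e1 : |r.1 - q.1| = |q.1 - r.1| := abs_sub_comm _ _
  have e2 : |r.2 - q.2| = |q.2 - r.2| := abs_sub_comm _ _
  simp only [pvManh]
  linarith

lemma chain_step (path : List (Int × Int))
    (hch : List.IsChain (fun p q : Int × Int => |q.1 - p.1| + |q.2 - p.2| ≤ 1) path)
    (a : Nat) (h : a + 1 < path.length) :
    pvManh (path.getD a (0, 0)) (path.getD (a + 1) (0, 0)) ≤ 1 := by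
  have := hch.getElem a h
  rw [List.getD_eq_getElem path _ (by omega), List.getD_eq_getElem path _ h]
  simpa [pvManh] using this

lemma manh_getD_le (path : List (Int × Int))
    (hch : List.IsChain (fun p q : Int × Int => |q.1 - p.1| + |q.2 - p.2| ≤ 1) path) :
    ∀ (k a : Nat), a + k < path.length →
      pvManh (path.getD a (0, 0)) (path.getD (a + k) (0, 0)) ≤ (k : Int) := by
  intro k
  induction k with
  | zero =>
    intro a _
    simpa using le_of_eq (pvManh_self (path.getD a (0, 0)))
  | succ k ih =>
    intro a h
    have t := pvManh_triangle (path.getD a (0, 0)) (path.getD (a + k) (0, 0))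
      (path.getD (a + k + 1) (0, 0))
    have h1 := ih a (by omega)
    have h2 := chain_step path hch (a + k) (by omega)
    have e : a + (k + 1) = a + k + 1 := by omega
    rw [e]
    push_cast
    linarith

-- Lipschitz property of j ↦ pvD path i j on valid indices
lemma pvD_lip (path : List (Int × Int)) (i : Int)
    (hch : List.IsChain (fun p q : Int × Int => |q.1 - p.1| + |q.2 - p.2| ≤ 1) path)
    (x y : Int) (hx : 0 ≤ x) (hxy : x ≤ y) (hy : y < (path.length : Int)) :
    pvD path i y ≤ pvD path i x + (y - x) ∧ pvD path i x ≤ pvD path i y + (y - x) := by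
  have hm : pvManh (pvAt path x) (pvAt path y) ≤ y - x := by
    have h := manh_getD_le path hch (y - x).toNat x.toNat (by omega)
    have hidx : x.toNat + (y - x).toNat = y.toNat := by omega
    rw [hidx] at h
    have hc : (((y - x).toNat : Nat) : Int) = y - x := by omega
    calc pvManh (pvAt path x) (pvAt path y) ≤ (((y - x).toNat : Nat) : Int) := h
      _ = y - x := hc
  have t1 := pvManh_triangle (pvAt path i) (pvAt path x) (pvAt path y)
  have t2 := pvManh_triangle (pvAt path i) (pvAt path y) (pvAt path x)
  have hc := pvManh_comm (pvAt path y) (pvAt path x)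
  constructor
  · simp only [pvD]; linarith
  · simp only [pvD]; linarith

lemma pyGet?_eq_pvAt (path : List (Int × Int)) (j : Int) (h0 : 0 ≤ j) (h1 : j < (path.length : Int)) :
    PySem.List.pyGet? path j = some (pvAt path j) := by
  rw [PySem.List.pyGet?_eq_some_getElem path h0 h1]
  rw [pvAt, List.getD_eq_getElem path _ (by omega)]

-- one step of B on a valid index is governed by pvQ
lemma pvBstep_eq_ite (path : List (Int × Int)) (i max_time min_saved : Int)
    (hi0 : 0 ≤ i) (hin : i < (path.length : Int)) (j : Int)
    (hj0 : 0 ≤ j) (hjn : j < (path.length : Int)) (s : List (Int × Int)) :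
    pvBstep path i max_time min_saved s j =
      if pvQ path i max_time min_saved j then PySem.Set.add s (pvAt path j) else s := by
  unfold pvBstep
  rw [pyGet?_eq_pvAt path j hj0 hjn, pyGet?_eq_pvAt path i hi0 hin]
  simp only [pvQ, pvD, pvManh, ge_iff_le]
  rfl

-- a fold of pvBstep over a range of non-qualifying indices is the identity
lemma fold_fail (path : List (Int × Int)) (i max_time min_saved : Int)
    (hi0 : 0 ≤ i) (hin : i < (path.length : Int)) (a0 b : Int)
    (hb : b ≤ (path.length : Int)) (ha0 : 0 ≤ a0)
    (hfail : ∀ j, a0 ≤ j → j < b → ¬ pvQ path i max_time min_saved j) :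
    ∀ (k : Nat) (a : Int) (s : List (Int × Int)), a0 ≤ a → (b - a).toNat ≤ k →
      (PySem.List.pyRange a b 1).foldl (pvBstep path i max_time min_saved) s = s := by
  intro k
  induction k with
  | zero =>
    intro a s ha hk
    rw [PySem.List.pyRange_one_eq_nil (by omega)]
    rfl
  | succ k ih =>
    intro a s ha hk
    by_cases hab : a < b
    · rw [PySem.List.pyRange_one_cons hab]
      simp only [List.foldl_cons]
      rw [pvBstep_eq_ite path i max_time min_saved hi0 hin a (by omega) (by omega) s,
        if_neg (hfail a ha hab)]
      exact ih (a + 1) s (by omega) (by omega)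
    · rw [PySem.List.pyRange_one_eq_nil (by omega)]
      rfl

-- A's inner block-add fold equals B's fold over the same index window
lemma fold_block (path : List (Int × Int)) (i max_time min_saved : Int)
    (hi0 : 0 ≤ i) (hin : i < (path.length : Int))
    (a c : Int) (s : List (Int × Int)) (ha : 0 ≤ a) (hac : a + c ≤ (path.length : Int))
    (hq : ∀ t : Int, 0 ≤ t → t < c → pvQ path i max_time min_saved (a + t)) :
    (PySem.List.pyRange 0 c 1).foldl
      (fun s k =>
        match PySem.List.pyGet? path (a + k) with
        | some p => PySem.Set.add s p
        | none => s) s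
    = (PySem.List.pyRange a (a + c) 1).foldl (pvBstep path i max_time min_saved) s := by
  rw [PySem.List.pyRange_one 0 c, PySem.List.pyRange_one a (a + c)]
  rw [List.foldl_map, List.foldl_map]
  have hcc : (a + c - a).toNat = (c - 0).toNat := by omega
  rw [hcc]
  apply PySem.List.foldl_congr_mem
  intro acc x hx
  have hxc : (x : Int) < c := by
    have := List.mem_range.mp hx
    omega
  have hx0 : (0 : Int) ≤ (x : Int) := by omega
  have hQ := hq (x : Int) hx0 hxc
  have hv : a + (0 + (x : Int)) = a + (x : Int) := by omega
  rw [hv, pyGet?_eq_pvAt path (a + (x : Int)) (by omega) (by omega)]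
  rw [pvBstep_eq_ite path i max_time min_saved hi0 hin (a + (x : Int)) (by omega) (by omega) acc,
    if_pos hQ]

-- main loop characterisation: A's jump loop computes B's flat fold
lemma loop_eq (path : List (Int × Int)) (i max_time min_saved : Int)
    (hi0 : 0 ≤ i) (hin : i < (path.length : Int))
    (hch : List.IsChain (fun p q : Int × Int => |q.1 - p.1| + |q.2 - p.2| ≤ 1) path) :
    ∀ (k : Nat) (j : Int) (s : List (Int × Int)), 0 ≤ j → ((path.length : Int) - j).toNat ≤ k →
      get_shortcuts_loop path i max_time min_saved j s =
        (PySem.List.pyRange j (path.length : Int) 1).foldl (pvBstep path i max_time min_saved) s := by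
  intro k
  induction k with
  | zero =>
    intro j s hj0 hk
    rw [get_shortcuts_loop, dif_neg (by omega : ¬ j < (path.length : Int)),
      PySem.List.pyRange_one_eq_nil (by omega)]
    rfl
  | succ k ih =>
    intro j s hj0 hk
    by_cases hlt : j < (path.length : Int)
    · rw [get_shortcuts_loop, dif_pos hlt,
        pyGet?_eq_pvAt path i hi0 hin, pyGet?_eq_pvAt path j hj0 hlt]
      dsimp only
      rw [show pvManh (pvAt path i) (pvAt path j) = pvD path i j from rfl]
      by_cases hq : pvD path i j ≤ max_time ∧ j - i - pvD path i j ≥ min_saved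
      · rw [dif_pos hq]
        set D := pvD path i j with hD
        set c := min ((path.length : Int) - j) (max_time - D + 1) with hc
        have hcl : c ≤ (path.length : Int) - j := min_le_left _ _
        have hcr : c ≤ max_time - D + 1 := min_le_right _ _
        have hc1 : 1 ≤ c := le_min (by omega) (by have := hq.1; omega)
        have hblock : ∀ t : Int, 0 ≤ t → t < c → pvQ path i max_time min_saved (j + t) := by
          intro t ht0 htc
          have hlip := pvD_lip path i hch j (j + t) hj0 (by omega) (by omega)
          constructor
          · have : t ≤ max_time - D := by omega
            omega
          · have := hq.2
            omega
        have hfold := fold_block path i max_time min_saved hi0 hin j c s hj0 (by omega) hblock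
        rw [ih (j + (max_time - D + 1)) _ (by omega) (by omega)]
        rw [PySem.List.pyRange_one_append j (j + c) (path.length : Int) (by omega) (by omega),
          List.foldl_append, ← hfold]
        by_cases hle : j + (max_time - D + 1) ≤ (path.length : Int)
        · have : c = max_time - D + 1 := by omega
          rw [this]
        · have hcn : j + c = (path.length : Int) := by omega
          have e1 : PySem.List.pyRange (j + c) (path.length : Int) = ([] : List Int) :=
            PySem.List.pyRange_one_eq_nil (by omega)
          have e2 : PySem.List.pyRange (j + (max_time - D + 1)) (path.length : Int) = ([] : List Int) :=
            PySem.List.pyRange_one_eq_nil (by omega)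
          rw [e1, e2]
      · rw [dif_neg hq]
        by_cases hq2 : pvD path i j ≤ max_time
        · rw [dif_pos hq2]
          set g := j - i - pvD path i j with hg
          set skip := PySem.Int.floordiv (min_saved + 1 - g) 2 with hskip
          have hgl : g < min_saved := by
            by_contra hcon
            exact hq ⟨hq2, by omega⟩
          have hskip2 : skip = (min_saved + 1 - g) / 2 := by
            rw [hskip, PySem.Int.floordiv_eq_ediv_of_pos (by omega)]
          have hskip1 : 1 ≤ skip := by omega
          set m := min ((path.length : Int)) (j + skip) with hm
          have hml : m ≤ (path.length : Int) := min_le_left _ _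
          have hmr : m ≤ j + skip := min_le_right _ _
          have hjm : j ≤ m := le_min (by omega) (by omega)
          have hfail : ∀ j', j ≤ j' → j' < m → ¬ pvQ path i max_time min_saved j' := by
            intro j' hjj hjm hQ
            have hlip := pvD_lip path i hch j j' hj0 hjj (by omega)
            have h2t : 2 * (j' - j) ≤ min_saved - 1 - g := by omega
            have := hQ.2
            omega
          rw [ih (j + skip) s (by omega) (by omega)]
          rw [PySem.List.pyRange_one_append j m (path.length : Int) (by omega) (by omega),
            List.foldl_append,
            fold_fail path i max_time min_saved hi0 hin j m (by omega) hj0 hfail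
              (m - j).toNat j s (le_refl j) (le_refl _)]
          by_cases hle : j + skip ≤ (path.length : Int)
          · have : m = j + skip := by omega
            rw [this]
          · have hmn : m = (path.length : Int) := by omega
            have e1 : PySem.List.pyRange m (path.length : Int) = ([] : List Int) :=
              PySem.List.pyRange_one_eq_nil (by omega)
            have e2 : PySem.List.pyRange (j + skip) (path.length : Int) = ([] : List Int) :=
              PySem.List.pyRange_one_eq_nil (by omega)
            rw [e1, e2]
        · rw [dif_neg hq2]
          set D := pvD path i j with hD
          set m := min ((path.length : Int)) (j + (D - max_time)) with hm
          have hml : m ≤ (path.length : Int) := min_le_left _ _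
          have hmr : m ≤ j + (D - max_time) := min_le_right _ _
          have hDmt : max_time < D := by omega
          have hjm : j ≤ m := le_min (by omega) (by omega)
          have hfail : ∀ j', j ≤ j' → j' < m → ¬ pvQ path i max_time min_saved j' := by
            intro j' hjj hjm hQ
            have hlip := pvD_lip path i hch j j' hj0 hjj (by omega)
            have := hQ.1
            omega
          rw [ih (j + (D - max_time)) s (by omega) (by omega)]
          rw [PySem.List.pyRange_one_append j m (path.length : Int) (by omega) (by omega),
            List.foldl_append,
            fold_fail path i max_time min_saved hi0 hin j m (by omega) hj0 hfail
              (m - j).toNat j s (le_refl j) (le_refl _)]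
          by_cases hle : j + (D - max_time) ≤ (path.length : Int)
          · have : m = j + (D - max_time) := by omega
            rw [this]
          · have hmn : m = (path.length : Int) := by omega
            have e1 : PySem.List.pyRange m (path.length : Int) = ([] : List Int) :=
              PySem.List.pyRange_one_eq_nil (by omega)
            have e2 : PySem.List.pyRange (j + (D - max_time)) (path.length : Int) = ([] : List Int) :=
              PySem.List.pyRange_one_eq_nil (by omega)
            rw [e1, e2]
    · rw [get_shortcuts_loop, dif_neg hlt, PySem.List.pyRange_one_eq_nil (by omega)]
      rfl

-- ===== VERDICT (by name: the statement is the Claim_ definition above) =====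
theorem get_shortcuts_spec : Claim_equal_get_shortcuts := by
  intro path i max_time min_saved _ hpre
  unfold Spec_get_shortcuts
  rw [alt_eq, get_shortcuts]
  by_cases hwin : i + min_saved + 2 < (path.length : Int)
  · obtain ⟨hi0, hin, hs0, hch⟩ := hpre hwin
    exact (loop_eq path i max_time min_saved hi0 hin hch
      ((path.length : Int) - (i + min_saved + 2)).toNat (i + min_saved + 2) [] hs0 (le_refl _))
  · rw [get_shortcuts_loop, dif_neg (by omega : ¬ i + min_saved + 2 < (path.length : Int)),
      PySem.List.pyRange_one_eq_nil (by omega)]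
    rfl
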